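-- pv_equiv track=rewrite | github.com/Santiago1119/Python-coursera | max_carro.py | producto_mas_costoso
-- ===== SOURCE A (Python) =====
-- def producto_mas_costoso (carrito_compras:dict)->str:
--     """
--     Dado un diccionario retorna el producto más costoso del carro, si hay dos
--     productos con el mismo precio retorna el menor alfabeticamente
--
--     Parameters
--     ----------
--     carrito_compras : dict
--         diccionario con los productos como llaves y los precios como valores.
--
--     Returns
--     -------
--     str
--         retorna un string con el producto más costoso del carro de compra y si
--         el diccionario esta vacio retorna "No hay productos en el carrito".
--
--     """
--
--     producto_costoso = "No hay productos en el carrito"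
--     keys = carrito_compras.keys()
--     key_order = sorted(keys)
--     dic_order = {}
--
--     for key in key_order:
--         dic_order[key] = carrito_compras[key]
--
--     if len(carrito_compras) > 0:
--         producto_costoso = max(dic_order, key = dic_order.get)
--
--     return producto_costoso
-- ===== SOURCE B (Python) =====
-- def producto_mas_costoso(carrito_compras: dict) -> str:
--     if not carrito_compras:
--         return "No hay productos en el carrito"
--     max_precio = max(carrito_compras.values())
--     return min(k for k, v in carrito_compras.items() if v == max_precio)
-- ===== Notes on version B (the rewrite author's own statement) =====
-- stated objective: simpler
-- what changed: Instead of sorting all keys and rebuilding a dict in alphabetical order so that max(..., key=dict.get) lands on the alphabetically first maximum, B computes the maximum price in one pass over the values and then takes the alphabetical minimum of the keys that reach it; no sort and no second dict are built.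
import Mathlib
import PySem

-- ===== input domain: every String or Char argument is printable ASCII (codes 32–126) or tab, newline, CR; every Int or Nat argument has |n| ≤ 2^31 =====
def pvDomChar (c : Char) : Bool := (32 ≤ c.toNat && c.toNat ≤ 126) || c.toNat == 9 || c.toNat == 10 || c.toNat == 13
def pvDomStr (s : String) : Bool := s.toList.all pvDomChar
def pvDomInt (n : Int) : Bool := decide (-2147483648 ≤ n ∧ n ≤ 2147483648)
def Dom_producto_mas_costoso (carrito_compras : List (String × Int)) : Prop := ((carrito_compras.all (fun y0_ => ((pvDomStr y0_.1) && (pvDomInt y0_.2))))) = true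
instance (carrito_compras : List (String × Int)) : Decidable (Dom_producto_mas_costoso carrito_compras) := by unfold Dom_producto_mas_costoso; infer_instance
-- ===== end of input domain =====

-- B returns the same product as A but without sorting: one pass for the maximum
-- price, then the alphabetical minimum of the keys at that price.

-- ===== PORT A =====
-- sorts the keys, rebuilds the dict in alphabetical order, then takes
-- max(dic_order, key=dic_order.get); every looked-up key is present, so
-- carrito_compras[key] / dic_order.get(k) are ported as getD (no KeyError can fire)
def producto_mas_costoso (carrito_compras : List (String × Int)) : String :=
  let d := PySem.Dict.ofList carrito_compras
  let producto_costoso := "No hay productos en el carrito"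
  let keys := d.keys
  let key_order := PySem.List.sorted keys (fun k => k) false
  let dic_order := key_order.foldl (fun acc key => acc.insert key (d.getD key 0)) PySem.Dict.empty
  if d.size > 0 then
    (PySem.List.max? dic_order.keys (fun k => dic_order.getD k 0)).getD producto_costoso
  else
    producto_costoso

-- ===== PORT B =====
-- min(...) over the non-empty generator always returns; .getD "" only unwraps the Option
def producto_mas_costoso_alt (carrito_compras : List (String × Int)) : String :=
  let d := PySem.Dict.ofList carrito_compras
  if d.size = 0 then
    "No hay productos en el carrito"
  else
    let max_precio := (PySem.List.max? d.values (fun v => v)).getD 0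
    (PySem.List.min? ((d.items.filter (fun p => p.2 == max_precio)).map (·.1)) (fun k => k)).getD ""

-- ===== PRECONDITION & SPEC =====
def Spec_producto_mas_costoso (carrito_compras : List (String × Int)) (out : String) : Prop := out = producto_mas_costoso_alt carrito_compras
instance (carrito_compras : List (String × Int)) (out : String) : Decidable (Spec_producto_mas_costoso carrito_compras out) := by unfold Spec_producto_mas_costoso; infer_instance

-- ===== CLAIM (what is proved, stated in full; the proofs are below) =====
def Claim_equal_producto_mas_costoso : Prop := ∀ (carrito_compras : List (String × Int)), Dom_producto_mas_costoso carrito_compras → Spec_producto_mas_costoso carrito_compras (producto_mas_costoso carrito_compras)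

-- ===== LEMMAS AND PROOFS =====


-- the literal step function of PySem.List.max?'s running-max fold
def maxStep {α κ : Type} [LT κ] [DecidableLT κ] (key : α → κ) (acc : Option α) (x : α) : Option α :=
  match acc with
  | none => some x
  | some m => if key m < key x then some x else some m

theorem max?_eq_foldl_maxStep {α κ : Type} [LT κ] [DecidableLT κ] (xs : List α) (key : α → κ) :
    PySem.List.max? xs key = xs.foldl (maxStep key) none := rfl

theorem foldl_maxStep_congr {α κ : Type} [LT κ] [DecidableLT κ] (f g : α → κ) :
    ∀ (xs : List α) (acc : Option α), (∀ x ∈ xs, f x = g x) → (∀ a, acc = some a → f a = g a) →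
    xs.foldl (maxStep f) acc = xs.foldl (maxStep g) acc
  | [], acc, _, _ => rfl
  | x :: t, acc, h, hacc => by
    simp only [List.foldl_cons]
    have hx : f x = g x := h x (by simp)
    have step_eq : maxStep f acc x = maxStep g acc x := by
      cases hc : acc with
      | none => rfl
      | some b => simp [maxStep, hacc b hc, hx]
    rw [step_eq]
    refine foldl_maxStep_congr f g t _ (fun y hy => h y (by simp [hy])) ?_
    intro a ha
    cases hc : acc with
    | none =>
      subst hc; simp [maxStep] at ha; subst ha; exact hx
    | some b =>
      subst hc; simp only [maxStep] at ha
      split at ha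
      · cases ha; exact hx
      · cases ha; exact hacc a rfl

-- max? only looks at the key function on elements of the list
theorem max?_congr_mem {α κ : Type} [LT κ] [DecidableLT κ] {xs : List α} {f g : α → κ}
    (h : ∀ x ∈ xs, f x = g x) : PySem.List.max? xs f = PySem.List.max? xs g := by
  rw [max?_eq_foldl_maxStep, max?_eq_foldl_maxStep]
  exact foldl_maxStep_congr f g xs none h (by simp)

theorem foldl_maxStep_first {α κ : Type} [LinearOrder α] [LinearOrder κ] (key : α → κ) :
    ∀ (xs : List α) (acc : Option α) (m : α), xs.Pairwise (· < ·) →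
    (∀ a, acc = some a → ∀ y ∈ xs, a < y) →
    xs.foldl (maxStep key) acc = some m →
    (∀ a, acc = some a → key a ≤ key m ∧ (key a = key m → m ≤ a)) ∧
    (∀ y ∈ xs, key y ≤ key m ∧ (key y = key m → m ≤ y))
  | [], acc, m, _, _, hfold => by
    simp only [List.foldl_nil] at hfold
    refine ⟨fun a ha => ?_, by simp⟩
    rw [hfold] at ha; cases ha
    exact ⟨le_refl _, fun _ => le_refl _⟩
  | x :: t, acc, m, hp, hacc, hfold => by
    rw [List.pairwise_cons] at hp
    obtain ⟨hx, ht⟩ := hp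
    simp only [List.foldl_cons] at hfold
    have hacc' : ∀ a, maxStep key acc x = some a → ∀ y ∈ t, a < y := by
      intro a ha y hy
      cases hc : acc with
      | none => subst hc; simp [maxStep] at ha; subst ha; exact hx y hy
      | some b =>
        subst hc; simp only [maxStep] at ha
        split at ha
        · cases ha; exact hx y hy
        · cases ha; exact hacc a rfl y (by simp [hy])
    obtain ⟨IH1, IH2⟩ := foldl_maxStep_first key t (maxStep key acc x) m ht hacc' hfold
    constructor
    · intro a ha
      cases hc : acc with
      | none => rw [hc] at ha; cases ha
      | some b =>
        rw [hc] at ha; cases ha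
        by_cases hlt : key a < key x
        · have hxm := IH1 x (by rw [hc]; simp [maxStep, hlt])
          refine ⟨le_of_lt (lt_of_lt_of_le hlt hxm.1), fun heq => ?_⟩
          exact absurd (lt_of_lt_of_le hlt hxm.1) (by rw [heq]; exact lt_irrefl _)
        · exact IH1 a (by rw [hc]; simp [maxStep, hlt])
    · intro y hy
      rcases List.mem_cons.mp hy with rfl | hyt
      · cases hc : acc with
        | none => exact IH1 y (by subst hc; simp [maxStep])
        | some b =>
          by_cases hlt : key b < key y
          · exact IH1 y (by subst hc; simp [maxStep, hlt])
          · have hb := IH1 b (by subst hc; simp [maxStep, hlt])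
            rw [not_lt] at hlt
            refine ⟨le_trans hlt hb.1, fun heq => ?_⟩
            have hbm : key b = key m := le_antisymm hb.1 (heq ▸ hlt)
            have h1 : m ≤ b := hb.2 hbm
            have h2 : b < y := hacc b hc y (by simp)
            exact le_of_lt (lt_of_le_of_lt h1 h2)
      · exact IH2 y hyt

-- the running-max fold keeps the FIRST maximal element; on a strictly increasing
-- list that is the smallest element whose key attains the maximum
theorem max?_first {α κ : Type} [LinearOrder α] [LinearOrder κ] {xs : List α} {key : α → κ}
    (hs : xs.Pairwise (· < ·)) {m : α} (h : PySem.List.max? xs key = some m) :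
    ∀ y ∈ xs, key y = key m → m ≤ y := by
  rw [max?_eq_foldl_maxStep] at h
  intro y hy heq
  exact ((foldl_maxStep_first key xs none m hs (by simp) h).2 y hy).2 heq

-- ===== VERDICT (by name: the statement is the Claim_ definition above) =====
theorem producto_mas_costoso_spec : Claim_equal_producto_mas_costoso := by
  intro carrito _
  unfold Spec_producto_mas_costoso
  simp only [producto_mas_costoso, producto_mas_costoso_alt]
  set d := PySem.Dict.ofList carrito with hd
  by_cases hsz : d.size = 0
  · rw [if_neg (by omega), if_pos hsz]
  · rw [if_pos (by omega), if_neg hsz]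
    have hnd : d.keys.Nodup := PySem.Dict.nodup_keys_ofList carrito
    set f : String → Int := fun k => d.getD k 0 with hf
    set ks := PySem.List.sorted d.keys (fun k => k) false with hks
    have hperm : ks.Perm d.keys := PySem.List.sorted_perm d.keys (fun k => k) false
    have hksnd : ks.Nodup := hperm.nodup_iff.mpr hnd
    have hle : ks.Pairwise (fun a b => a ≤ b) := PySem.List.sorted_pairwise d.keys (fun k => k)
    have hlt : ks.Pairwise (· < ·) :=
      (hle.and hksnd).imp (fun h => lt_of_le_of_ne h.1 h.2)
    set dic_order := ks.foldl (fun acc key => acc.insert key (d.getD key 0)) PySem.Dict.empty with hdo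
    have hkeys : dic_order.keys = ks := by
      rw [hdo, PySem.Dict.keys_foldl_insert]
      simp only [PySem.Dict.keys_empty, PySem.Set.update_nil_left]
      exact PySem.Set.ofList_eq_self_of_nodup ks hksnd
    have hitems : dic_order.items = ks.map (fun k => (k, d.getD k 0)) := by
      rw [hdo]
      rw [PySem.Dict.items_foldl_insert_fresh ks (fun a => a) (fun a => d.getD a 0) PySem.Dict.empty
        (fun a _ => PySem.Dict.contains_empty a) (by simpa using hksnd)]
      rfl
    have hgd : ∀ k ∈ ks, dic_order.getD k 0 = d.getD k 0 := by
      intro k hk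
      exact PySem.Dict.getD_of_mem_items dic_order
        (by rw [hitems]; exact List.mem_map.mpr ⟨k, hk, rfl⟩)
        (by rw [hkeys]; exact hksnd) 0
    rw [hkeys, max?_congr_mem hgd]
    -- keys and values are nonempty
    have hkne : ks ≠ [] := by
      intro hnil
      apply hsz
      have hkeysnil : d.keys = [] := (hnil ▸ hperm : List.Perm [] d.keys).symm.eq_nil
      have hit : d.items = [] := by
        have := congrArg List.length hkeysnil
        simpa [PySem.Dict.keys, List.length_eq_zero_iff] using this
      simp [PySem.Dict.size, hit]
    cases hm : PySem.List.max? ks f with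
    | none => exact absurd ((PySem.List.max?_eq_none_iff ks f).mp hm) hkne
    | some m =>
    have hvals : d.values = d.keys.map f := PySem.Dict.values_eq_map_keys d hnd 0
    have hvne : d.values ≠ [] := by
      rw [hvals]
      intro h
      have hkn : d.keys = [] := by simpa using h
      exact hkne ((hkn ▸ hperm : List.Perm _ []).eq_nil)
    cases hv : PySem.List.max? d.values (fun v => v) with
    | none => exact absurd ((PySem.List.max?_eq_none_iff d.values _).mp hv) hvne
    | some maxv =>
    have hm_mem : m ∈ ks := PySem.List.max?_mem hm
    have hm_max : ∀ k ∈ ks, f k ≤ f m := PySem.List.max?_isMax hm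
    have hmv_mem : maxv ∈ d.values := PySem.List.max?_mem hv
    have hmv_max : ∀ v ∈ d.values, v ≤ maxv := PySem.List.max?_isMax hv
    have hfm : f m = maxv := by
      apply le_antisymm
      · exact hmv_max _ (by rw [hvals]; exact List.mem_map.mpr ⟨m, hperm.subset hm_mem, rfl⟩)
      · rw [hvals] at hmv_mem
        obtain ⟨k0, hk0, hk0v⟩ := List.mem_map.mp hmv_mem
        exact hk0v ▸ hm_max k0 (hperm.mem_iff.mpr hk0)
    -- the filtered key list of B
    set fk := (d.items.filter (fun p => p.2 == maxv)).map (fun p => p.1) with hfk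
    have hgetD_items : ∀ p ∈ d.items, d.getD p.1 0 = p.2 := by
      intro p hp
      exact PySem.Dict.getD_of_mem_items d (by exact hp) hnd 0
    have hm_fk : m ∈ fk := by
      have hmk : m ∈ d.keys := hperm.subset hm_mem
      have hex : ∃ x, (m, x) ∈ d.items := by simpa [PySem.Dict.keys] using hmk
      obtain ⟨v0, hv0⟩ := hex
      have hval : d.getD m 0 = v0 := PySem.Dict.getD_of_mem_items d hv0 hnd 0
      have hv0m : v0 = maxv := by rw [← hfm]; exact hval.symm
      exact List.mem_map.mpr ⟨(m, v0), List.mem_filter.mpr ⟨hv0, by simp [hv0m]⟩, rfl⟩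
    have hfk_sub : ∀ k ∈ fk, k ∈ ks ∧ f k = maxv := by
      intro k hk
      obtain ⟨p, hp, hp1⟩ := List.mem_map.mp hk
      obtain ⟨hpi, hpv⟩ := List.mem_filter.mp hp
      have hkk : k ∈ d.keys := by
        simpa [PySem.Dict.keys] using List.mem_map.mpr ⟨p, hpi, hp1⟩
      refine ⟨hperm.mem_iff.mpr hkk, ?_⟩
      have hgd2 := hgetD_items p hpi
      rw [hp1] at hgd2
      exact hgd2.trans (eq_of_beq hpv)
    have hfkne : fk ≠ [] := List.ne_nil_of_mem hm_fk
    cases hr : PySem.List.min? fk (fun k => k) with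
    | none => exact absurd ((PySem.List.min?_eq_none_iff fk _).mp hr) hfkne
    | some r =>
    have hr_mem : r ∈ fk := PySem.List.min?_mem hr
    have hr_min : ∀ y ∈ fk, r ≤ y := PySem.List.min?_isMin hr
    have hrm : r = m := by
      apply le_antisymm (hr_min m hm_fk)
      obtain ⟨hrks, hrv⟩ := hfk_sub r hr_mem
      exact max?_first hlt hm r hrks (by rw [hrv, hfm])
    simp [← hfk, hr, hrm]
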